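-- pv_equiv track=rewrite | github.com/Yalfoosh/Advent-of-Code-2019 | day4.py | second_check
-- ===== SOURCE A (Python) =====
-- def second_check(vector):
--     min_count = len(vector)
--
--     i = 1
--     while i < len(vector):
--         if vector[i] == vector[i - 1]:
--             current_count = 2
--
--             i += 1
--
--             while i < len(vector) and vector[i] == vector[i - 1]:
--                 current_count += 1
--                 i += 1
--
--             min_count = min(min_count, current_count)
--         elif vector[i] < vector[i - 1]:
--             return False
--         else:
--             i += 1
--
--     return min_count == 2
-- ===== SOURCE B (Python) =====
-- def second_check(vector):
--     # Run-length encode the vector, then test the two conditions over the runs: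
--     # keys strictly increasing, and some run of length exactly 2.
--     runs = []
--     for x in vector:
--         if runs and runs[-1][0] == x:
--             runs[-1] = (x, runs[-1][1] + 1)
--         else:
--             runs.append((x, 1))
--     increasing = all(a[0] < b[0] for a, b in zip(runs, runs[1:]))
--     return increasing and any(n == 2 for _, n in runs)
-- ===== Notes on version B (the rewrite author's own statement) =====
-- stated objective: simpler
-- what changed: B run-length-encodes the vector in one pass and then checks the group list (strictly increasing keys, some group of length exactly 2) instead of A's index/while-pointer scan maintaining a running minimum seeded with len(vector).
-- intended difference: On two-element strictly increasing vectors A returns True (min_count is initialized to len(vector)==2 although no adjacent pair exists) while B returns False, which is the intended answer since the password rule requires a run of exactly two equal digits. — e.g. on second_check([0, 1]): A returns true, B returns false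
import Mathlib
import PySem

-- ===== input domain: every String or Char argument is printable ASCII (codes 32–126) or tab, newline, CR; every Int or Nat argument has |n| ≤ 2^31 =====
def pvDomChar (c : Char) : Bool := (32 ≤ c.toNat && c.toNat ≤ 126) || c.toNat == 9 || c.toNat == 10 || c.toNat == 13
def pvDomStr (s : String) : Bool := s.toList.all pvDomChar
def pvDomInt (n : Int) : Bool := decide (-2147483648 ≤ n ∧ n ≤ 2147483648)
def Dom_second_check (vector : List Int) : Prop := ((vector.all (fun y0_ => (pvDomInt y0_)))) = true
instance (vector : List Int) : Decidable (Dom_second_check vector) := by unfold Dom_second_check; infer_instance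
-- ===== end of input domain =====

-- B replaces A's index/while-pointer scan by a one-pass run-length encoding followed by
-- two checks over the run list (simpler); on two-element strictly increasing vectors A's
-- accidental min_count==len(vector) initialisation makes it return true, B returns false (D_ below).


-- ===== PORT A =====
-- inner while: consume elements equal to the previous value, counting; returns
-- (current_count, remaining suffix)
def scInner (prev : Int) (rest : List Int) (cc : Nat) : Nat × List Int :=
  match rest with
  | [] => (cc, [])
  | x :: xs => if x = prev then scInner x xs (cc + 1) else (cc, x :: xs)

theorem scInner_len (prev : Int) (rest : List Int) (cc : Nat) :
    (scInner prev rest cc).2.length ≤ rest.length := by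
  induction rest generalizing prev cc with
  | nil => simp [scInner]
  | cons x xs ih =>
    simp only [scInner]
    split
    · exact le_trans (ih x (cc + 1)) (Nat.le_succ _)
    · simp

-- outer while over the suffix after the element `prev` (= vector[i-1])
def scLoop (prev : Int) (rest : List Int) (mc : Nat) : Bool :=
  match rest with
  | [] => mc == 2
  | x :: xs =>
    if x = prev then
      let p := scInner x xs 2
      scLoop x p.2 (min mc p.1)
    else if x < prev then
      false
    else
      scLoop x xs mc
termination_by rest.length
decreasing_by
  · exact Nat.lt_succ_of_le (scInner_len x xs 2)
  · simp

def second_check (vector : List Int) : Bool :=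
  match vector with
  | [] => (0 : Nat) == 2
  | p :: rest => scLoop p rest (p :: rest).length

-- ===== PORT B =====
-- one step of the run-length encoding loop (extend the last run or start a new one)
def rleStep (runs : List (Int × Nat)) (x : Int) : List (Int × Nat) :=
  match runs.getLast? with
  | some (k, n) => if k = x then runs.dropLast ++ [(x, n + 1)] else runs ++ [(x, 1)]
  | none => [(x, 1)]

def second_check_alt (vector : List Int) : Bool :=
  let runs := vector.foldl rleStep []
  (runs.zip runs.tail).all (fun p => p.1.1 < p.2.1) && runs.any (fun r => r.2 == 2)

-- ===== PRECONDITION & SPEC =====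
-- On two-element strictly increasing vectors A returns true (its min_count is initialized
-- to len(vector) = 2 although no adjacent equal pair exists) while B returns false, which is
-- the intended answer since the rule requires a run of exactly two equal elements.
def D_second_check (vector : List Int) : Prop :=
  vector.length = 2 ∧ vector.getD 0 0 < vector.getD 1 0
instance (vector : List Int) : Decidable (D_second_check vector) := by
  unfold D_second_check; infer_instance

def Spec_second_check (vector : List Int) (out : Bool) : Prop :=
  ¬ D_second_check vector → out = second_check_alt vector
instance (vector : List Int) (out : Bool) : Decidable (Spec_second_check vector out) := by
  unfold Spec_second_check; infer_instance

def pvDiffWitness_second_check : List Int := [0, 1]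
def pvDiffWitnessOut_second_check : Bool × Bool := (true, false)

-- ===== CLAIM (what is proved, stated in full; the proofs are below) =====
def Claim_unchanged_second_check : Prop :=
  ∀ (vector : List Int), Dom_second_check vector → Spec_second_check vector (second_check vector)
def Claim_changed_second_check : Prop :=
  Dom_second_check (pvDiffWitness_second_check) ∧ D_second_check (pvDiffWitness_second_check) ∧
  second_check (pvDiffWitness_second_check) = pvDiffWitnessOut_second_check.1 ∧
  second_check_alt (pvDiffWitness_second_check) = pvDiffWitnessOut_second_check.2 ∧
  pvDiffWitnessOut_second_check.1 ≠ pvDiffWitnessOut_second_check.2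
def Claim_exact_second_check : Prop :=
  ∀ (vector : List Int), Dom_second_check vector → D_second_check vector →
    second_check vector ≠ second_check_alt vector

-- ===== LEMMAS AND PROOFS =====
-- structural run-length encoding: rleC k n xs = runs of (k repeated n more) ++ xs
def rleC (k : Int) (n : Nat) : List Int → List (Int × Nat)
  | [] => [(k, n)]
  | x :: xs => if x = k then rleC k (n + 1) xs else (k, n) :: rleC x 1 xs

theorem foldl_rleStep (l : List Int) (acc : List (Int × Nat)) (k : Int) (n : Nat) :
    List.foldl rleStep (acc ++ [(k, n)]) l = acc ++ rleC k n l := by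
  induction l generalizing acc k n with
  | nil => simp [rleC]
  | cons x xs ih =>
    have hstep : rleStep (acc ++ [(k, n)]) x
        = if x = k then acc ++ [(k, n + 1)] else (acc ++ [(k, n)]) ++ [(x, 1)] := by
      by_cases h : x = k
      · subst h
        simp [rleStep, List.getLast?_concat, List.dropLast_concat]
      · have h' : ¬ k = x := fun hh => h hh.symm
        simp [rleStep, List.getLast?_concat, List.dropLast_concat, h', h]
    rw [List.foldl_cons, hstep, rleC]
    by_cases h : x = k
    · rw [if_pos h, if_pos h, ih]
    · rw [if_neg h, if_neg h, ih, List.append_assoc]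
      simp

theorem rleC_head (xs : List Int) (k : Int) (n : Nat) :
    ∃ m rs, rleC k n xs = (k, m) :: rs := by
  induction xs generalizing n with
  | nil => exact ⟨n, [], rfl⟩
  | cons x xs ih =>
    by_cases h : x = k
    · simpa [rleC, h] using ih (n + 1)
    · exact ⟨n, rleC x 1 xs, by simp [rleC, h]⟩

-- mechanical min-fold the A-side accumulates over run lengths
def fm (mc : Nat) (lens : List Nat) : Nat :=
  lens.foldl (fun m n => if 2 ≤ n then min m n else m) mc

-- A-side recursion expressed over the run list
def goRuns : List (Int × Nat) → Nat → Bool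
  | [], mc => mc == 2
  | [(_, n)], mc => (if 2 ≤ n then min mc n else mc) == 2
  | (k, n) :: (k', n') :: rs, mc =>
      if k' < k then false
      else goRuns ((k', n') :: rs) (if 2 ≤ n then min mc n else mc)

theorem scLoop_inner_go (rest : List Int) : ∀ k cc mc, 2 ≤ cc →
    (scLoop k (scInner k rest cc).2 (min mc (scInner k rest cc).1)
      = goRuns (rleC k cc rest) mc)
    ∧ (∀ p, scLoop p rest mc = goRuns (rleC p 1 rest) mc) := by
  induction rest with
  | nil =>
    intro k cc mc hcc
    constructor
    · simp [scInner, scLoop, rleC, goRuns, if_pos hcc]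
    · intro p; simp [scLoop, rleC, goRuns]
  | cons x xs ih =>
    intro k cc mc hcc
    constructor
    · by_cases h : x = k
      · subst h
        simp only [scInner, if_pos rfl, rleC, if_pos rfl]
        exact (ih x (cc + 1) mc (by omega)).1
      · simp only [scInner, if_neg h, rleC, if_neg h]
        obtain ⟨m, rs, hr⟩ := rleC_head xs x 1
        rw [hr]
        show scLoop k (x :: xs) (min mc cc) = _
        simp only [goRuns, scLoop, if_neg h]
        by_cases hlt : x < k
        · simp [if_pos hlt]
        · rw [if_neg hlt, if_neg hlt, if_pos hcc, ← hr]
          exact (ih x 2 (min mc cc) (by omega)).2 x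
    · intro p
      by_cases h : x = p
      · subst h
        simp only [scLoop, if_pos rfl, rleC, if_pos rfl]
        exact (ih x 2 mc (by omega)).1
      · simp only [scLoop, if_neg h, rleC, if_neg h]
        obtain ⟨m, rs, hr⟩ := rleC_head xs x 1
        rw [hr]
        simp only [goRuns]
        by_cases hlt : x < p
        · simp [if_pos hlt]
        · rw [if_neg hlt, if_neg hlt]
          have : (if 2 ≤ 1 then min mc 1 else mc) = mc := by norm_num
          rw [this, ← hr]
          exact (ih x 2 mc (by omega)).2 x

-- the Bool form of the strictly-increasing-keys test used by the B port
def chainB (runs : List (Int × Nat)) : Bool :=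
  (runs.zip runs.tail).all (fun p => p.1.1 < p.2.1)

-- the Bool form of the adjacent-keys-distinct property of a run-length encoding
def adjNe (runs : List (Int × Nat)) : Bool :=
  (runs.zip runs.tail).all (fun p => p.1.1 != p.2.1)

theorem goRuns_eq (runs : List (Int × Nat)) : ∀ mc, adjNe runs = true →
    goRuns runs mc = (chainB runs && (fm mc (runs.map Prod.snd) == 2)) := by
  induction runs with
  | nil => intro mc _; simp [goRuns, fm, chainB]
  | cons r rs ih =>
    intro mc hne
    obtain ⟨k, n⟩ := r
    cases rs with
    | nil => simp [goRuns, fm, chainB]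
    | cons r' rs' =>
      obtain ⟨k', n'⟩ := r'
      have hx : ((k != k') && adjNe ((k', n') :: rs')) = true := hne
      have hx' : (k != k') = true ∧ adjNe ((k', n') :: rs') = true := by simpa using hx
      have hkk : ¬ k = k' := by simpa using hx'.1
      have hne' : adjNe ((k', n') :: rs') = true := hx'.2
      simp only [goRuns]
      by_cases hlt : k' < k
      · have hkl : ¬ k < k' := by omega
        simp [if_pos hlt, chainB, hkl]
      · have hkl : k < k' := by
          rcases lt_trichotomy k k' with h | h | h
          · exact h
          · exact absurd h hkk
          · exact absurd h hlt
        rw [if_neg hlt, ih _ hne']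
        have hfmeq : fm mc (((k, n) :: (k', n') :: rs').map Prod.snd)
            = fm (if 2 ≤ n then min mc n else mc) (((k', n') :: rs').map Prod.snd) := rfl
        have hch : chainB ((k, n) :: (k', n') :: rs')
            = (decide (k < k') && chainB ((k', n') :: rs')) := rfl
        rw [hfmeq, hch]
        simp [hkl]

theorem fm_cons (mc n : Nat) (ns : List Nat) :
    fm mc (n :: ns) = fm (if 2 ≤ n then min mc n else mc) ns := rfl

theorem fm_le_init (lens : List Nat) : ∀ mc, fm mc lens ≤ mc := by
  induction lens with
  | nil => intro mc; simp [fm]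
  | cons n ns ih =>
    intro mc
    rw [fm_cons]
    by_cases h : 2 ≤ n
    · rw [if_pos h]; exact le_trans (ih _) (min_le_left _ _)
    · rw [if_neg h]; exact ih mc

theorem fm_lb (lens : List Nat) : ∀ mc, 2 ≤ mc → 2 ≤ fm mc lens := by
  induction lens with
  | nil => intro mc h; simpa [fm] using h
  | cons n ns ih =>
    intro mc h
    rw [fm_cons]
    by_cases hn : 2 ≤ n
    · rw [if_pos hn]; exact ih _ (le_min h hn)
    · rw [if_neg hn]; exact ih mc h

theorem fm_mem (lens : List Nat) : ∀ mc, fm mc lens = mc ∨ fm mc lens ∈ lens := by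
  induction lens with
  | nil => intro mc; left; simp [fm]
  | cons n ns ih =>
    intro mc
    rw [fm_cons]
    by_cases hn : 2 ≤ n
    · rw [if_pos hn]
      rcases ih (min mc n) with h | h
      · rcases Nat.le_total mc n with hmn | hmn
        · left; rw [h]; omega
        · right; rw [h, Nat.min_eq_right hmn]; exact List.mem_cons_self
      · right; right; exact h
    · rw [if_neg hn]
      rcases ih mc with h | h
      · left; exact h
      · right; right; exact h

theorem fm_of_mem_two (lens : List Nat) : ∀ mc, 2 ≤ mc → 2 ∈ lens → fm mc lens = 2 := by
  induction lens with
  | nil => intro mc _ h; simp at h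
  | cons n ns ih =>
    intro mc hmc hm
    rcases List.mem_cons.mp hm with h | h
    · subst h
      rw [fm_cons, if_pos (le_refl 2)]
      have h1 : fm (min mc 2) ns ≤ min mc 2 := fm_le_init ns _
      have h2 : 2 ≤ fm (min mc 2) ns := fm_lb ns _ (le_min hmc (le_refl 2))
      omega
    · rw [fm_cons]
      by_cases hn : 2 ≤ n
      · rw [if_pos hn]; exact ih _ (le_min hmc hn) h
      · rw [if_neg hn]; exact ih mc hmc h

theorem rleC_adjNe (xs : List Int) (k : Int) (n : Nat) :
    adjNe (rleC k n xs) = true := by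
  induction xs generalizing k n with
  | nil => simp [rleC, adjNe]
  | cons x xs ih =>
    by_cases h : x = k
    · simpa [rleC, h] using ih k (n + 1)
    · obtain ⟨m, rs, hr⟩ := rleC_head xs x 1
      have h' : adjNe ((k, n) :: (x, m) :: rs) = ((k != x) && adjNe ((x, m) :: rs)) := rfl
      rw [rleC, if_neg h, hr, h', ← hr, ih x 1]
      simp
      exact fun hh => h hh.symm

-- final numeric step: with mc ≥ 3 (the vector's length), fm == 2 iff some run length is 2
theorem fm_eq_two_iff (lens : List Nat) (mc : Nat) (h3 : 3 ≤ mc) :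
    (fm mc lens == 2) = lens.any (fun n => n == 2) := by
  by_cases h2 : 2 ∈ lens
  · rw [fm_of_mem_two lens mc (by omega) h2]
    have : lens.any (fun n => n == 2) = true := List.any_eq_true.mpr ⟨2, h2, by simp⟩
    rw [this]
    rfl
  · have hnn : fm mc lens ≠ 2 := by
      rcases fm_mem lens mc with h | h
      · omega
      · intro hh; rw [hh] at h; exact h2 h
    have h1 : (fm mc lens == 2) = false := by simpa using hnn
    rw [h1]
    symm
    simp only [List.any_eq_false, beq_iff_eq]
    intro n hn hn2
    rw [hn2] at hn; exact h2 hn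

-- ===== VERDICT (by name: the statement is the Claim_ definition above) =====
theorem second_check_spec : Claim_unchanged_second_check := by
  intro vector _ hD
  match vector with
  | [] => decide
  | [a] => simp [second_check, scLoop, second_check_alt, rleStep]
  | [a, b] =>
    have hab : ¬ a < b := by
      intro h; exact hD ⟨rfl, by simpa using h⟩
    by_cases h : b = a
    · subst h
      simp [second_check, scLoop, scInner, second_check_alt, rleStep]
    · have hba : b < a := by
        rcases lt_trichotomy a b with h1 | h1 | h1
        · exact absurd h1 hab
        · exact absurd h1.symm h
        · exact h1
      have h2 : ¬ a < b := by omega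
      have hne2 : ¬ a = b := fun hh => h hh.symm
      simp [second_check, scLoop, scInner, second_check_alt, rleStep, h, hne2, hba, h2]
  | p :: q :: r :: rest =>
    show second_check (p :: q :: r :: rest) = second_check_alt (p :: q :: r :: rest)
    have hfold : List.foldl rleStep [] (p :: q :: r :: rest)
        = rleC p 1 (q :: r :: rest) := by
      have := foldl_rleStep (q :: r :: rest) [] p 1
      simpa [rleStep] using this
    have hA : second_check (p :: q :: r :: rest)
        = goRuns (rleC p 1 (q :: r :: rest)) (rest.length + 3) := by
      show scLoop p (q :: r :: rest) (p :: q :: r :: rest).length = _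
      have := (scLoop_inner_go (q :: r :: rest) p 2 (rest.length + 3) (by omega)).2 p
      simpa using this
    rw [hA]
    rw [goRuns_eq _ _ (rleC_adjNe _ p 1)]
    unfold second_check_alt
    rw [hfold]
    rw [fm_eq_two_iff _ _ (by omega)]
    have hany : (rleC p 1 (q :: r :: rest)).any (fun r => r.2 == 2)
        = ((rleC p 1 (q :: r :: rest)).map Prod.snd).any (fun n => n == 2) := by
      rw [List.any_map]
      rfl
    rw [← hany]
    rfl

theorem second_check_changed : Claim_changed_second_check := by
  unfold Claim_changed_second_check
  refine ⟨by decide, by decide, ?_, by decide, by decide⟩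
  show second_check [0, 1] = (true, false).1
  simp [second_check, scLoop, scInner]

theorem second_check_tight : Claim_exact_second_check := by
  intro vector _ hD
  obtain ⟨hlen, hlt⟩ := hD
  match vector with
  | [a, b] =>
    have hlt' : a < b := by simpa using hlt
    have hne : ¬ b = a := by omega
    have hne' : ¬ a = b := by omega
    have h2 : ¬ b < a := by omega
    simp [second_check, scLoop, scInner, second_check_alt, rleStep, hne, hne', h2, hlt']
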